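-- pv_equiv track=rewrite | github.com/ericdingle/adventofcode | 2024/12/main.py | get_num_edges
-- ===== SOURCE A (Python) =====
-- from collections import defaultdict
--
-- def get_num_edges(edges):
--   d = defaultdict(list)
--   for e1, e2, i, j in edges:
--     d[(e1, e2, i)].append(j)
--
--   s = 0
--   for vals in d.values():
--     vals = sorted(vals)
--     s += [y - x > 1 for x, y in zip(vals, vals[1:])].count(True) + 1
--   return s
-- ===== SOURCE B (Python) =====
-- def get_num_edges(edges):
--   d = {}
--   for e1, e2, i, j in edges:
--     d.setdefault((e1, e2, i), set()).add(j)
--   total = 0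
--   for s in d.values():
--     total += sum(1 for j in s if j - 1 not in s)
--   return total
-- ===== Notes on version B (the rewrite author's own statement) =====
-- stated objective: faster
-- what changed: Instead of sorting each group's values and counting adjacent gaps > 1, B collects each group's values into a set and counts the values j whose predecessor j-1 is absent (the run starts), eliminating the per-group sort.
import Mathlib
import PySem

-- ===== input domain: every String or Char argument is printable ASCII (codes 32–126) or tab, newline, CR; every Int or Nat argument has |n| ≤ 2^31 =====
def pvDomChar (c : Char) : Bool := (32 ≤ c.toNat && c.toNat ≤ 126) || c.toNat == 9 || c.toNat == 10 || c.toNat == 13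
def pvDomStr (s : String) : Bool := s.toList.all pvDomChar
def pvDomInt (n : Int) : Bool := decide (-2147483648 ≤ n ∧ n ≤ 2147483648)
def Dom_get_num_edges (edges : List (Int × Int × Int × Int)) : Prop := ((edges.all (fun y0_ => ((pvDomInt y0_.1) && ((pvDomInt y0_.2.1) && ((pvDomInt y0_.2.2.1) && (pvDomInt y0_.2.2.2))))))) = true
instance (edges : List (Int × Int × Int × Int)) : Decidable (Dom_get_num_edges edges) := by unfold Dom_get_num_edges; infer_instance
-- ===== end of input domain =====

-- B replaces A's per-group sort + adjacent-gap scan by a per-group set, counting the j with j-1 absent (run starts); same value without sorting.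

-- ===== PORT A =====
def get_num_edges (edges : List (Int × Int × Int × Int)) : Int :=
  -- d = defaultdict(list); for e1, e2, i, j in edges: d[(e1, e2, i)].append(j)
  let d : PySem.Dict (Int × Int × Int) (List Int) :=
    edges.foldl (fun d e => d.modify (e.1, e.2.1, e.2.2.1) [] (fun l => l ++ [e.2.2.2])) PySem.Dict.empty
  -- s = 0; for vals in d.values(): vals = sorted(vals); s += [y-x > 1 for x, y in zip(vals, vals[1:])].count(True) + 1
  d.values.foldl (fun s vals =>
    let vals := PySem.List.sorted vals (fun x => x) false
    s + ((((vals.zip (PySem.List.slice vals (some 1) none)).map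
            (fun p => decide (p.2 - p.1 > 1))).count true : Int) + 1)) 0

-- ===== PORT B =====
def get_num_edges_alt (edges : List (Int × Int × Int × Int)) : Int :=
  -- d = {}; for e1, e2, i, j in edges: d.setdefault((e1, e2, i), set()).add(j)
  let d : PySem.Dict (Int × Int × Int) (PySem.Set Int) :=
    edges.foldl (fun d e => d.modify (e.1, e.2.1, e.2.2.1) PySem.Set.empty (fun s => PySem.Set.add s e.2.2.2)) PySem.Dict.empty
  -- total = 0; for s in d.values(): total += sum(1 for j in s if j - 1 not in s)
  d.values.foldl (fun total s =>
    total + s.foldl (fun acc j => if PySem.Set.contains s (j - 1) then acc else acc + 1) 0) 0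

-- ===== PRECONDITION & SPEC =====
def Spec_get_num_edges (edges : List (Int × Int × Int × Int)) (out : Int) : Prop := out = get_num_edges_alt edges
instance (edges : List (Int × Int × Int × Int)) (out : Int) : Decidable (Spec_get_num_edges edges out) := by unfold Spec_get_num_edges; infer_instance

-- ===== CLAIM (what is proved, stated in full; the proofs are below) =====
def Claim_equal_get_num_edges : Prop := ∀ (edges : List (Int × Int × Int × Int)), Dom_get_num_edges edges → Spec_get_num_edges edges (get_num_edges edges)

-- ===== LEMMAS AND PROOFS =====

-- A's per-group body (sort, then count adjacent gaps > 1, plus 1)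
def pvBodyA (vals : List Int) : Int :=
  let v := PySem.List.sorted vals (fun x => x) false
  (((v.zip (PySem.List.slice v (some 1) none)).map (fun p => decide (p.2 - p.1 > 1))).count true : Int) + 1

-- B's per-group body (count elements whose predecessor is absent)
def pvBodyB (s : PySem.Set Int) : Int :=
  s.foldl (fun acc j => if PySem.Set.contains s (j - 1) then acc else acc + 1) 0

-- A's gap count on a list, at the Nat level
def pvGapsN (v : List Int) : Nat := ((v.zip v.tail).map (fun p => decide (p.2 - p.1 > 1))).count true

-- core combinatorial fact: on a sorted list, (#gaps > 1) + 1 = #elements j of the underlying set with j-1 absent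
theorem pvRuns (v : List Int) (hp : v.Pairwise (· ≤ ·)) (hne : v ≠ []) :
    pvGapsN v + 1 = (v.toFinset.filter (fun j => (j - 1) ∉ v.toFinset)).card := by
  induction v with
  | nil => exact absurd rfl hne
  | cons x t ih =>
    cases t with
    | nil =>
      simp [pvGapsN, Finset.filter_singleton]
    | cons y t2 =>
      rw [List.pairwise_cons] at hp
      obtain ⟨hx, hp'⟩ := hp
      have hxy : x ≤ y := hx y (by simp)
      have hyall : ∀ z ∈ (y :: t2), y ≤ z := by
        intro z hz
        rcases List.mem_cons.mp hz with rfl | hz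
        · exact le_refl z
        · exact (List.pairwise_cons.mp hp').1 z hz
      have hgaps : pvGapsN (x :: y :: t2) = pvGapsN (y :: t2) + (if y - x > 1 then 1 else 0) := by
        simp [pvGapsN, List.count_cons]
      set F' := (y :: t2).toFinset with hF'
      have hF : (x :: y :: t2).toFinset = insert x F' := by simp [hF']
      have hyallF : ∀ z ∈ F', y ≤ z := by
        intro z hz
        exact hyall z (by simpa [hF', List.mem_toFinset] using hz)
      by_cases hgap : y - x > 1
      · have hxlt : ∀ z ∈ F', x + 2 ≤ z := fun z hz => by have := hyallF z hz; omega
        have hxnot : x ∉ F' := fun h => by have := hxlt x h; omega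
        have hPx : (x - 1) ∉ insert x F' := by
          simp only [Finset.mem_insert, not_or]
          exact ⟨by omega, fun h => by have := hxlt _ h; omega⟩
        have h2 : F'.filter (fun j => (j - 1) ∉ insert x F') = F'.filter (fun j => (j - 1) ∉ F') := by
          apply Finset.filter_congr
          intro z hz
          have := hxlt z hz
          simp only [Finset.mem_insert, not_or]
          constructor
          · exact fun h => h.2
          · exact fun h => ⟨by omega, h⟩
        rw [hgaps, if_pos hgap, hF, Finset.filter_insert, if_pos hPx, h2,
            Finset.card_insert_of_notMem (fun h => hxnot (Finset.mem_of_mem_filter _ h)),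
            ← ih hp' (by simp)]
      · have hyx : y = x ∨ y = x + 1 := by omega
        rcases hyx with rfl | rfl
        · rw [hgaps, if_neg hgap, hF, Finset.insert_eq_self.mpr (by simp [hF']), ← ih hp' (by simp)]
        · have hxnot : x ∉ F' := fun h => by have := hyallF x h; omega
          have hPx : (x - 1) ∉ insert x F' := by
            simp only [Finset.mem_insert, not_or]
            exact ⟨by omega, fun h => by have := hyallF _ h; omega⟩
          have h2 : F'.filter (fun j => (j - 1) ∉ insert x F')
              = (F'.filter (fun j => (j - 1) ∉ F')).erase (x + 1) := by
            ext z
            simp only [Finset.mem_filter, Finset.mem_erase, Finset.mem_insert, not_or]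
            constructor
            · rintro ⟨hz, hnz1, hnz2⟩
              exact ⟨by omega, hz, hnz2⟩
            · rintro ⟨hzy, hz, hnz⟩
              exact ⟨hz, by omega, hnz⟩
          have hymem : (x + 1) ∈ F'.filter (fun j => (j - 1) ∉ F') := by
            refine Finset.mem_filter.mpr ⟨by simp [hF'], ?_⟩
            simpa using fun h => hxnot (by simpa using h)
          have hcard1 : 1 ≤ (F'.filter (fun j => (j - 1) ∉ F')).card :=
            Finset.card_pos.mpr ⟨_, hymem⟩
          rw [hgaps, if_neg hgap, hF, Finset.filter_insert, if_pos hPx, h2,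
              Finset.card_insert_of_notMem
                (fun h => hxnot (Finset.mem_of_mem_filter _ (Finset.mem_of_mem_erase h))),
              Finset.card_erase_of_mem hymem, ← ih hp' (by simp)]
          omega

-- B's fold is the length of the filtered set
theorem pvCount (s : PySem.Set Int) (l : List Int) (acc : Int) :
    l.foldl (fun acc j => if PySem.Set.contains s (j - 1) then acc else acc + 1) acc
      = acc + ((l.filter (fun j => !PySem.Set.contains s (j - 1))).length : Int) := by
  induction l generalizing acc with
  | nil => simp
  | cons j t ih =>
    simp only [List.foldl_cons, ih, List.filter_cons]
    by_cases h : (j - 1) ∈ s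
    · simp [h]
    · simp [h]
      omega

-- per-group agreement: A's sorted gap scan = B's run-start count over the set
theorem pvMain (L : List Int) (h : L ≠ []) : pvBodyA L = pvBodyB (PySem.Set.ofList L) := by
  set v := PySem.List.sorted L (fun x => x) false with hv
  set S := PySem.Set.ofList L with hS
  have hvne : v ≠ [] := by
    rw [hv, Ne, PySem.List.sorted_eq_nil_iff]
    exact h
  have hp : v.Pairwise (· ≤ ·) := by
    have := PySem.List.sorted_pairwise L (fun x => x)
    simpa [hv] using this
  have hmem : ∀ x : Int, x ∈ S ↔ x ∈ v := by
    intro x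
    rw [hS, PySem.Set.mem_ofList, hv, PySem.List.mem_sorted]
  have hSfin : S.toFinset = v.toFinset := by
    apply Finset.ext
    intro z
    simp only [List.mem_toFinset]
    exact hmem z
  have hA : pvBodyA L = (pvGapsN v : Int) + 1 := by
    rw [pvBodyA, pvGapsN, hv]
    simp [PySem.List.slice_from_one]
  have hB : pvBodyB S = ((S.filter (fun j => !PySem.Set.contains S (j - 1))).length : Int) := by
    rw [pvBodyB, pvCount]
    simp
  have hlen : (S.filter (fun j => !PySem.Set.contains S (j - 1))).length
      = (v.toFinset.filter (fun j => (j - 1) ∉ v.toFinset)).card := by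
    rw [← List.toFinset_card_of_nodup ((PySem.Set.nodup_ofList L).filter _)]
    rw [List.toFinset_filter, hSfin]
    apply congrArg
    apply Finset.filter_congr
    intro z hz
    simp only [Bool.not_eq_true', ← Bool.not_eq_true]
    simp [PySem.Set.contains_eq_listContains, hmem]
  rw [hA, hB, hlen, ← pvRuns v hp hvne]
  push_cast
  ring

-- A's result as a sum of per-group bodies over the first-occurrence key list
theorem pvA_values (edges : List (Int × Int × Int × Int)) :
    get_num_edges edges =
      ((PySem.Set.ofList (edges.map (fun e => (e.1, e.2.1, e.2.2.1)))).map
        (fun k => pvBodyA ((edges.filter (fun e => (e.1, e.2.1, e.2.2.1) == k)).map (fun e => e.2.2.2)))).sum := by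
  have hd : (edges.foldl (fun d e => d.modify (e.1, e.2.1, e.2.2.1) [] (fun l => l ++ [e.2.2.2]))
      (PySem.Dict.empty : PySem.Dict (Int × Int × Int) (List Int)))
      = (edges.map (fun e => ((e.1, e.2.1, e.2.2.1), e.2.2.2))).foldl
          (fun d p => d.modify p.1 [] (fun l => l ++ [p.2])) PySem.Dict.empty := by
    rw [List.foldl_map]
  set d := (edges.foldl (fun d e => d.modify (e.1, e.2.1, e.2.2.1) [] (fun l => l ++ [e.2.2.2]))
      (PySem.Dict.empty : PySem.Dict (Int × Int × Int) (List Int))) with hddef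
  have hnd : d.keys.Nodup := by
    rw [hd]
    exact PySem.Dict.nodup_keys_foldl_modify_key _ _ _ _ _ (by simp [PySem.Dict.keys_empty])
  have hkeys : d.keys = PySem.Set.ofList (edges.map (fun e => (e.1, e.2.1, e.2.2.1))) := by
    rw [hddef, PySem.Dict.keys_foldl_modify_key, PySem.Dict.keys_empty, PySem.Set.update_nil_left]
  have hget : ∀ k, d.getD k [] =
      (edges.filter (fun e => (e.1, e.2.1, e.2.2.1) == k)).map (fun e => e.2.2.2) := by
    intro k
    rw [hd, PySem.Dict.getD_foldl_modify_append, PySem.Dict.getD_empty]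
    simp [List.filter_map, List.map_map, Function.comp_def]
  have hbody : get_num_edges edges = d.values.foldl (fun s vals => s + pvBodyA vals) 0 := rfl
  rw [hbody, PySem.Dict.values_eq_map_keys d hnd [], hkeys, PySem.List.foldl_add]
  simp [List.map_map, Function.comp_def, hget]

-- grouping loop of B: getD of the fold is the set of the matching values
theorem pvGetD_foldl_add (l : List ((Int × Int × Int) × Int))
    (d : PySem.Dict (Int × Int × Int) (PySem.Set Int)) (c : Int × Int × Int) :
    (l.foldl (fun d p => d.modify p.1 PySem.Set.empty (fun s => PySem.Set.add s p.2)) d).getD c PySem.Set.empty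
      = PySem.Set.update (d.getD c PySem.Set.empty) ((l.filter (fun p => p.1 == c)).map (fun p => p.2)) := by
  induction l generalizing d with
  | nil => simp [PySem.Set.update]
  | cons p t ih =>
    simp only [List.foldl_cons, ih, PySem.Dict.getD_modify]
    by_cases h : p.1 = c
    · simp [h, PySem.Set.update]
    · simp [h, Ne.symm h]

-- B's result as a sum of per-group bodies over the same key list
theorem pvB_values (edges : List (Int × Int × Int × Int)) :
    get_num_edges_alt edges =
      ((PySem.Set.ofList (edges.map (fun e => (e.1, e.2.1, e.2.2.1)))).map
        (fun k => pvBodyB (PySem.Set.ofList ((edges.filter (fun e => (e.1, e.2.1, e.2.2.1) == k)).map (fun e => e.2.2.2))))).sum := by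
  have hd : (edges.foldl (fun d e => d.modify (e.1, e.2.1, e.2.2.1) PySem.Set.empty (fun s => PySem.Set.add s e.2.2.2))
      (PySem.Dict.empty : PySem.Dict (Int × Int × Int) (PySem.Set Int)))
      = (edges.map (fun e => ((e.1, e.2.1, e.2.2.1), e.2.2.2))).foldl
          (fun d p => d.modify p.1 PySem.Set.empty (fun s => PySem.Set.add s p.2)) PySem.Dict.empty := by
    rw [List.foldl_map]
  set d := (edges.foldl (fun d e => d.modify (e.1, e.2.1, e.2.2.1) PySem.Set.empty (fun s => PySem.Set.add s e.2.2.2))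
      (PySem.Dict.empty : PySem.Dict (Int × Int × Int) (PySem.Set Int))) with hddef
  have hnd : d.keys.Nodup := by
    rw [hd]
    exact PySem.Dict.nodup_keys_foldl_modify_key _ _ _ _ _ (by simp [PySem.Dict.keys_empty])
  have hkeys : d.keys = PySem.Set.ofList (edges.map (fun e => (e.1, e.2.1, e.2.2.1))) := by
    rw [hddef, PySem.Dict.keys_foldl_modify_key, PySem.Dict.keys_empty, PySem.Set.update_nil_left]
  have hget : ∀ k, d.getD k PySem.Set.empty =
      PySem.Set.ofList ((edges.filter (fun e => (e.1, e.2.1, e.2.2.1) == k)).map (fun e => e.2.2.2)) := by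
    intro k
    rw [hd, pvGetD_foldl_add, PySem.Dict.getD_empty,
       show (PySem.Set.empty : PySem.Set Int) = [] from rfl, PySem.Set.update_nil_left]
    simp [List.filter_map, List.map_map, Function.comp_def]
  have hbody : get_num_edges_alt edges = d.values.foldl (fun tot s => tot + pvBodyB s) 0 := rfl
  rw [hbody, PySem.Dict.values_eq_map_keys d hnd PySem.Set.empty, hkeys, PySem.List.foldl_add]
  simp only [show (PySem.Set.empty : PySem.Set Int) = [] from rfl] at hget
  simp [List.map_map, Function.comp_def, hget]

-- ===== VERDICT (by name: the statement is the Claim_ definition above) =====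
theorem get_num_edges_spec : Claim_equal_get_num_edges := by
  intro edges _
  unfold Spec_get_num_edges
  rw [pvA_values, pvB_values]
  apply congrArg
  apply List.map_congr_left
  intro k hk
  apply pvMain
  rw [PySem.Set.mem_ofList] at hk
  obtain ⟨e, he, rfl⟩ := List.mem_map.mp hk
  intro hnil
  have : e.2.2.2 ∈ (edges.filter (fun e' => (e'.1, e'.2.1, e'.2.2.1) == (e.1, e.2.1, e.2.2.1))).map (fun e => e.2.2.2) :=
    List.mem_map.mpr ⟨e, List.mem_filter.mpr ⟨he, by simp⟩, rfl⟩
  simp [hnil] at this
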